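-- pv_equiv track=rewrite | github.com/akuprym/yandex_algorithm_contest_6.0 | contest_2/task-D.py | calc_min_days
-- ===== SOURCE A (Python) =====
-- def calc_min_days(days: list[int], k: int) -> int:
--     days.sort()
--     count = 1
--     diff, similar = 0, 0
--     while similar < len(days):
--         if days[similar] <= days[diff] + k:
--             similar += 1
--         else:
--             count = max(count, similar - diff)
--             diff += 1
--     return max(count, similar - diff)
-- ===== SOURCE B (Python) =====
-- def calc_min_days(days: list[int], k: int) -> int:
--     # sorts `days` in place, like the original
--     days.sort()
--     best = 1
--     for i in range(len(days)):
--         j = _bisect_right(days, days[i] + k)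
--         best = max(best, j - i)
--     return best
--
--
-- def _bisect_right(a, x):
--     # standard binary search: insertion point after the last element <= x
--     lo, hi = 0, len(a)
--     while lo < hi:
--         mid = (lo + hi) // 2
--         if x < a[mid]:
--             hi = mid
--         else:
--             lo = mid + 1
--     return lo
-- ===== Notes on version B (the rewrite author's own statement) =====
-- stated objective: alternative
-- what changed: Replaces the coordinated two-pointer scan over the sorted list by an independent per-element binary search (bisect_right of days[i]+k) folded with max.
import Mathlib
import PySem

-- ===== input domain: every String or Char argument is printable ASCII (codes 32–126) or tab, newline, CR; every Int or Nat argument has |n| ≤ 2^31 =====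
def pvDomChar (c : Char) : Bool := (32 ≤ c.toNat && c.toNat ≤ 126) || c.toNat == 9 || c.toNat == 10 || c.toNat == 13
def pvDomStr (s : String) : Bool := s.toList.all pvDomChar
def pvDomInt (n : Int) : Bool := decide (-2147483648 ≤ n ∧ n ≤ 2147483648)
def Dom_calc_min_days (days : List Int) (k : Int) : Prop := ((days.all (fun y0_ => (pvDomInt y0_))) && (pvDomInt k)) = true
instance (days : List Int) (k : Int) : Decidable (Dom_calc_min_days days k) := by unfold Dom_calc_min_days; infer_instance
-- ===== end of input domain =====

-- B replaces A's two-pointer scan of the sorted list by an independent binary search (bisect_right of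
-- days[i]+k) per index, folded with max — an alternative algorithm of the same cost, not claimed faster.
-- Both programs sort the argument list in place; the equivalence proved here is about the return value.

-- ===== PORT A =====
-- A's while-loop as fuel recursion; `none` models the IndexError Python raises on days[diff]/days[similar]
-- (excluded by Pre_); the loop runs at most 2*len+1 iterations, so the fuel 2*len+2 is never exhausted.
def calcLoopA (s : List Int) (k : Int) : Nat → Int → Int → Int → Option Int
  | 0, _, _, _ => none
  | fuel+1, count, diff, similar =>
    if similar < (s.length : Int) then
      match PySem.List.pyGet? s similar, PySem.List.pyGet? s diff with
      | some a, some b =>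
        if a ≤ b + k then calcLoopA s k fuel count diff (similar + 1)
        else calcLoopA s k fuel (max count (similar - diff)) (diff + 1) similar
      | _, _ => none
    else some (max count (similar - diff))

def calc_min_days (days : List Int) (k : Int) : Int :=
  let s := PySem.List.sorted days (fun x => x)
  (calcLoopA s k (2 * s.length + 2) 1 0 0).getD 0

-- ===== PORT B =====
-- Source B's hand-written `_bisect_right` is CPython's bisect.bisect_right verbatim; it is ported as the
-- prelude's binary-search primitive PySem.List.bisectRight (the same lo/hi/mid algorithm).
def calc_min_days_alt (days : List Int) (k : Int) : Int :=
  let s := PySem.List.sorted days (fun x => x)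
  (List.range s.length).foldl
    (fun best i => max best ((PySem.List.bisectRight s (s.getD i 0 + k) : Int) - (i : Int))) 1

-- ===== PRECONDITION & SPEC =====
-- Pre_ excludes exactly the inputs where A raises IndexError: for k < 0 on a nonempty list the diff
-- pointer always runs past the end of the list (similar can never reach len); A returns everywhere else.
def Pre_calc_min_days (days : List Int) (k : Int) : Prop := 0 ≤ k ∨ days = []
instance (days : List Int) (k : Int) : Decidable (Pre_calc_min_days days k) := by unfold Pre_calc_min_days; infer_instance

def pvWitness_calc_min_days : List Int × Int := ([3, 0, 4, 10], 2)

def Spec_calc_min_days (days : List Int) (k : Int) (out : Int) : Prop := out = calc_min_days_alt days k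
instance (days : List Int) (k : Int) (out : Int) : Decidable (Spec_calc_min_days days k out) := by unfold Spec_calc_min_days; infer_instance

-- ===== CLAIM (what is proved, stated in full; the proofs are below) =====
def Claim_equal_calc_min_days : Prop := ∀ (days : List Int) (k : Int), Dom_calc_min_days days k → Pre_calc_min_days days k → Spec_calc_min_days days k (calc_min_days days k)

-- ===== LEMMAS AND PROOFS =====

-- B's running best over the first m indices of the sorted list.
def bestUpTo (s : List Int) (k : Int) (m : Nat) : Int :=
  (List.range m).foldl
    (fun best i => max best ((PySem.List.bisectRight s (s.getD i 0 + k) : Int) - (i : Int))) 1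

theorem bestUpTo_succ (s : List Int) (k : Int) (m : Nat) :
    bestUpTo s k (m + 1)
      = max (bestUpTo s k m) ((PySem.List.bisectRight s (s.getD m 0 + k) : Int) - (m : Int)) := by
  simp [bestUpTo, List.range_succ]

theorem one_le_bestUpTo (s : List Int) (k : Int) (m : Nat) : 1 ≤ bestUpTo s k m := by
  induction m with
  | zero => simp [bestUpTo]
  | succ m ih => rw [bestUpTo_succ]; omega

theorem sorted_getD_mono (s : List Int) (hs : s.Pairwise (· ≤ ·)) {i j : Nat}
    (hij : i ≤ j) (hj : j < s.length) : s.getD i 0 ≤ s.getD j 0 := by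
  rw [List.getD_eq_getElem _ _ (by omega), List.getD_eq_getElem _ _ hj]
  rcases Nat.lt_or_ge i j with h | h
  · exact List.pairwise_iff_getElem.mp hs i j (by omega) hj h
  · have : i = j := by omega
    subst this; exact le_refl _

theorem pyGet?_of_nonneg_lt (xs : List Int) (i : Int) (h0 : 0 ≤ i) (h : i < xs.length) :
    PySem.List.pyGet? xs i = some (xs.getD i.toNat 0) := by
  have hi : i = ((i.toNat : Nat) : Int) := by omega
  rw [hi, PySem.List.pyGet?_natCast]
  rw [List.getElem?_eq_getElem (by omega), List.getD_eq_getElem _ _ (by omega)]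
  congr 1

-- bisect_right is determined by the split point: if the first m elements are ≤ x and element m (if any)
-- is > x, then bisectRight returns m.
theorem bisectRight_eq_of_split (s : List Int) (hs : s.Pairwise (· ≤ ·)) (x : Int) (m : Nat)
    (hm : m ≤ s.length)
    (hle : ∀ j : Nat, j < m → s.getD j 0 ≤ x)
    (hgt : m < s.length → x < s.getD m 0) :
    PySem.List.bisectRight s x = m := by
  obtain ⟨hr, h1, h2⟩ := PySem.List.bisectRight_spec s x hs
  set r := PySem.List.bisectRight s x with hrdef
  rcases Nat.lt_trichotomy r m with h | h | h
  · -- r < m ≤ len : s[r] ≤ x (hle) but x < s[r] (spec h2)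
    have hx := h2 r (by omega) (le_refl r)
    have := hle r h
    rw [List.getD_eq_getElem _ _ (by omega)] at this
    omega
  · exact h
  · -- m < r ≤ len : x < s[m] (hgt) but s[m] ≤ x (spec h1)
    have hx := hgt (by omega)
    have := h1 m (by omega) h
    rw [List.getD_eq_getElem _ _ (by omega)] at hx
    omega

-- In the tail [d, n) of B's fold, every bisect hits the end: bestUpTo n = max (bestUpTo d) (n - d).
theorem bestUpTo_tail (s : List Int) (k : Int) (hs : s.Pairwise (· ≤ ·)) (d : Nat)
    (hwin : ∀ j : Nat, j < s.length → s.getD j 0 ≤ s.getD d 0 + k) :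
    ∀ m : Nat, d < m → m ≤ s.length →
      bestUpTo s k m = max (bestUpTo s k d) ((s.length : Int) - (d : Int)) := by
  intro m
  induction m with
  | zero => omega
  | succ m ih =>
    intro hdm hmn
    have hF : (PySem.List.bisectRight s (s.getD m 0 + k) : Int) = (s.length : Int) := by
      rw [bisectRight_eq_of_split s hs _ s.length (le_refl _)
        (fun j hj => le_trans (hwin j hj) (by
          have := sorted_getD_mono s hs (i := d) (j := m) (by omega) (by omega)
          omega))
        (fun h => absurd h (by omega))]
    rw [bestUpTo_succ, hF]
    rcases Nat.lt_or_ge d m with h | h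
    · rw [ih h (by omega)]; omega
    · have : d = m := by omega
      subst this; omega

-- The two-pointer loop invariant: count is B's best over the first diff indices, every consumed index
-- fits the current window, and then the loop returns B's total best.
theorem calcLoopA_eq (s : List Int) (k : Int) (hs : s.Pairwise (· ≤ ·)) (hk : 0 ≤ k) :
    ∀ (fuel : Nat) (count diff similar : Int),
      0 ≤ diff → diff ≤ similar → similar ≤ (s.length : Int) →
      (∀ j : Nat, (j : Int) < similar → s.getD j 0 ≤ s.getD diff.toNat 0 + k) →
      count = bestUpTo s k diff.toNat →
      2 * (s.length : Int) - diff - similar < (fuel : Int) →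
      calcLoopA s k fuel count diff similar = some (bestUpTo s k s.length) := by
  intro fuel
  induction fuel with
  | zero => intro count diff similar h0 h1 h2 _ _ hfuel; exfalso; omega
  | succ fuel ih =>
    intro count diff similar h0 h1 h2 hwin hcount hfuel
    rw [calcLoopA]
    by_cases hlt : similar < (s.length : Int)
    · rw [if_pos hlt,
        pyGet?_of_nonneg_lt s similar (by omega) hlt,
        pyGet?_of_nonneg_lt s diff (by omega) (by omega)]
      dsimp only
      by_cases hcond : s.getD similar.toNat 0 ≤ s.getD diff.toNat 0 + k
      · rw [if_pos hcond]
        apply ih count diff (similar + 1) h0 (by omega) (by omega) ?_ hcount (by omega)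
        intro j hj
        rcases Nat.lt_or_ge j similar.toNat with h | h
        · exact hwin j (by omega)
        · have : j = similar.toNat := by omega
          subst this; exact hcond
      · rw [if_neg hcond]
        -- diff < similar: otherwise the condition would hold since 0 ≤ k
        have hds : diff < similar := by
          rcases Int.lt_or_le diff similar with h | h
          · exact h
          · exfalso
            have : diff = similar := by omega
            subst this
            exact hcond (by omega)
        apply ih _ (diff + 1) similar (by omega) (by omega) h2 ?_ ?_ (by omega)
        · intro j hj
          have hmono := sorted_getD_mono s hs (i := diff.toNat) (j := (diff + 1).toNat)
            (by omega) (by omega)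
          have := hwin j hj
          omega
        · -- max count (similar - diff) = bestUpTo (diff + 1)
          have hbis : PySem.List.bisectRight s (s.getD diff.toNat 0 + k) = similar.toNat := by
            apply bisectRight_eq_of_split s hs _ _ (by omega)
            · intro j hj; exact hwin j (by omega)
            · intro _; omega
          have hstep := bestUpTo_succ s k diff.toNat
          rw [hbis] at hstep
          have htn : (diff + 1).toNat = diff.toNat + 1 := by omega
          rw [htn, hstep, hcount]
          omega
    · rw [if_neg hlt]
      have hsim : similar = (s.length : Int) := by omega
      subst hsim
      rcases Int.lt_or_le diff (s.length : Int) with h | h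
      · -- diff < len: final max closes the last window
        have := bestUpTo_tail s k hs diff.toNat
          (fun j hj => hwin j (by omega)) s.length (by omega) (le_refl _)
        rw [this, hcount]
        congr 1
        omega
      · -- diff = len: nothing remains, count ≥ 1 absorbs the final max
        have hde : diff = (s.length : Int) := by omega
        subst hde
        have ht : ((s.length : Int)).toNat = s.length := by omega
        rw [hcount, ht]
        have h1b := one_le_bestUpTo s k s.length
        congr 1
        omega

theorem calc_min_days_empty (k : Int) : calc_min_days [] k = 1 := rfl

theorem calc_min_days_alt_empty (k : Int) : calc_min_days_alt [] k = 1 := rfl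

-- ===== VERDICT (by name: the statement is the Claim_ definition above) =====
theorem calc_min_days_spec : Claim_equal_calc_min_days := by
  intro days k _ hpre
  unfold Spec_calc_min_days
  rcases hpre with hk | hnil
  · simp only [calc_min_days, calc_min_days_alt]
    have hmain := calcLoopA_eq (PySem.List.sorted days (fun x => x)) k
      (PySem.List.sorted_pairwise days (fun x => x)) hk
      (2 * (PySem.List.sorted days (fun x => x)).length + 2) 1 0 0
      (by omega) (by omega) (by omega) (by intro j hj; omega)
      (by simp [bestUpTo]) (by push_cast; omega)
    rw [hmain]
    rfl
  · subst hnil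
    rw [calc_min_days_empty, calc_min_days_alt_empty]
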